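-- pv_equiv track=rewrite | github.com/dblume/static-twitter-archive | generate.py | make_page_range
-- ===== SOURCE A (Python) =====
-- def make_page_range(current, total, window=2):
--     pages = set()
--     pages.add(1)
--     pages.add(total)
--     for p in range(max(1, current - window), min(total, current + window) + 1):
--         pages.add(p)
--     sorted_pages = sorted(pages)
--     result = []
--     prev = None
--     for p in sorted_pages:
--         if prev is not None and p - prev > 1:
--             result.append(-1)  # ellipsis
--         result.append(p)
--         prev = p
--     return result
-- ===== SOURCE B (Python) =====
-- def make_page_range(current, total, window=2):
--     # Interval-merging: the candidate pages form up to three runs of consecutive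
--     # integers -- [1,1], [lo,hi] (the window around current) and [total,total].
--     # Merge overlapping/adjacent runs, then emit each merged run in full,
--     # separated by -1 (the ellipsis marker).
--     lo = max(1, current - window)
--     hi = min(total, current + window)
--     runs = [(1, 1), (total, total)]
--     if lo <= hi:
--         runs.append((lo, hi))
--     runs.sort()
--     merged = []
--     for a, b in runs:
--         if merged and a <= merged[-1][1] + 1:
--             last_a, last_b = merged[-1]
--             merged[-1] = (last_a, max(last_b, b))
--         else:
--             merged.append((a, b))
--     result = []
--     for a, b in merged:
--         if result:
--             result.append(-1)
--         result.extend(range(a, b + 1))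
--     return result
-- ===== Notes on version B (the rewrite author's own statement) =====
-- stated objective: faster
-- what changed: B treats the candidate pages as three runs of consecutive integers - the endpoint 1, the window run around current, and the endpoint total - merges overlapping or adjacent runs interval-merging style, and emits each merged run in full with -1 between runs, instead of A's element-by-element set build over the whole window run, full sort of all pages, and gap re-scan.
import Mathlib
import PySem

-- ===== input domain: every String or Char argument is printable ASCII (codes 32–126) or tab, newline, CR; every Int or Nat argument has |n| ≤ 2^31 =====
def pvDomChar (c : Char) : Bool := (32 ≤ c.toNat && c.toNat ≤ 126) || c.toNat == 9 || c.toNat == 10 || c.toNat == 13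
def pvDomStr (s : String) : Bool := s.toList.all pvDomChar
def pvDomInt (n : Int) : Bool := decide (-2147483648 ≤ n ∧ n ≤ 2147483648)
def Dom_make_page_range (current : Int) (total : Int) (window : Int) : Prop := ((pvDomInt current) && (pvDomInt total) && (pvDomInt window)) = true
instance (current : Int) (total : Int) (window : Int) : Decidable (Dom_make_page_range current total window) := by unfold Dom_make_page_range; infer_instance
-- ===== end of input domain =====

-- B replaces A's set-build + sort + gap scan by interval merging: the candidate pages form
-- three runs of consecutive integers, which are merged and emitted with -1 between merged
-- runs (objective: faster — no per-page set insertion and no sort of the whole page list).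

-- ===== PORT A =====
-- A's gap loop: state = (result, prev); appends -1 before p when prev is set and p - prev > 1.
def aStep (st : List Int × Option Int) (p : Int) : List Int × Option Int :=
  (st.1 ++ (match st.2 with
            | some prev => if p - prev > 1 then [(-1 : Int)] else []
            | none => []) ++ [p], some p)

def make_page_range (current : Int) (total : Int) (window : Int) : List Int :=
  let pages : PySem.Set Int := PySem.Set.empty
  let pages := PySem.Set.add pages 1
  let pages := PySem.Set.add pages total
  let pages := (PySem.List.pyRange (max 1 (current - window)) (min total (current + window) + 1) 1).foldl PySem.Set.add pages
  let sorted_pages := PySem.List.sorted pages (fun x => x) false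
  (sorted_pages.foldl aStep ([], none)).1

-- ===== PORT B =====
-- B's merge loop: extend the last merged run when the next run overlaps or abuts it.
def mergeStep (merged : List (Int × Int)) (r : Int × Int) : List (Int × Int) :=
  match merged.getLast? with
  | some l => if r.1 ≤ l.2 + 1 then merged.dropLast ++ [(l.1, max l.2 r.2)] else merged ++ [r]
  | none => merged ++ [r]

-- B's emit loop: each merged run in full, -1 before every run but the first.
def emitRun (result : List Int) (r : Int × Int) : List Int :=
  (if result.isEmpty then result else result ++ [(-1 : Int)]) ++ PySem.List.pyRange r.1 (r.2 + 1) 1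

def make_page_range_alt (current : Int) (total : Int) (window : Int) : List Int :=
  let lo := max 1 (current - window)
  let hi := min total (current + window)
  let runs : List (Int × Int) := [(1, 1), (total, total)]
  let runs := if lo ≤ hi then runs ++ [(lo, hi)] else runs
  let runs := PySem.List.sorted2 runs Prod.fst Prod.snd false
  let merged := runs.foldl mergeStep []
  merged.foldl emitRun []

-- ===== PRECONDITION & SPEC =====
def Spec_make_page_range (current : Int) (total : Int) (window : Int) (out : List Int) : Prop := out = make_page_range_alt current total window
instance (current : Int) (total : Int) (window : Int) (out : List Int) : Decidable (Spec_make_page_range current total window out) := by unfold Spec_make_page_range; infer_instance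

-- ===== CLAIM =====
def Claim_equal_make_page_range : Prop := ∀ (current : Int) (total : Int) (window : Int), Dom_make_page_range current total window → Spec_make_page_range current total window (make_page_range current total window)

-- ===== LEMMAS AND PROOFS =====

-- A's gap fold over a run of consecutive integers starting right after prev: no -1 inserted.
theorem gapfold_run (n : Nat) : ∀ (v : Int) (out : List Int),
    (PySem.List.pyRange (v + 1) (v + 1 + n) 1).foldl aStep (out, some v)
      = (out ++ PySem.List.pyRange (v + 1) (v + 1 + n) 1, some (v + n)) := by
  induction n with
  | zero =>
    intro v out
    rw [PySem.List.pyRange_one_eq_nil (by omega)]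
    simp
  | succ n ih =>
    intro v out
    rw [show ((n + 1 : Nat) : Int) = (n : Int) + 1 by omega]
    rw [show PySem.List.pyRange (v + 1) (v + 1 + ((n : Int) + 1)) 1
          = (v + 1) :: PySem.List.pyRange (v + 1 + 1) (v + 1 + ((n : Int) + 1)) 1
        from PySem.List.pyRange_one_cons (by omega)]
    simp only [List.foldl_cons, aStep, if_neg (show ¬ (v + 1 - v > 1) by omega)]
    have h2 : v + 1 + ((n : Int) + 1) = (v + 1) + 1 + (n : Nat) := by push_cast; ring
    rw [h2, ih (v + 1)]
    simp only [Prod.mk.injEq, Option.some.injEq]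
    constructor
    · simp
    · omega

-- A's gap fold over a later run [a..b]: one -1 iff the gap to prev exceeds 1.
theorem gapfold_chunk (a b v : Int) (out : List Int) (hab : a ≤ b) :
    (PySem.List.pyRange a (b + 1) 1).foldl aStep (out, some v)
      = (out ++ (if a - v > 1 then [(-1 : Int)] else []) ++ PySem.List.pyRange a (b + 1) 1, some b) := by
  rw [PySem.List.pyRange_one_cons (by omega)]
  simp only [List.foldl_cons, aStep]
  have h2 : b + 1 = a + 1 + (b - a).toNat := by omega
  rw [h2, gapfold_run]
  have h3 : a + ((b - a).toNat : Int) = b := by omega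
  rw [h3, ← h2]
  simp

-- A's gap fold started with no previous page.
theorem gapfold_none (a b : Int) (out : List Int) (hab : a ≤ b) :
    (PySem.List.pyRange a (b + 1) 1).foldl aStep (out, none)
      = (out ++ PySem.List.pyRange a (b + 1) 1, some b) := by
  rw [PySem.List.pyRange_one_cons (by omega)]
  simp only [List.foldl_cons, aStep]
  have h2 : b + 1 = a + 1 + (b - a).toNat := by omega
  rw [h2, gapfold_run]
  have h3 : a + ((b - a).toNat : Int) = b := by omega
  rw [h3, ← h2]
  simp

-- the page set A builds, as a sorted list, when the window run is nonempty
theorem A_sorted_main (current total window : Int)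
    (h : max 1 (current - window) ≤ min total (current + window)) :
    PySem.List.sorted
      ((PySem.List.pyRange (max 1 (current - window)) (min total (current + window) + 1) 1).foldl
        PySem.Set.add ((PySem.Set.empty.add 1).add total)) (fun x => x) false
    = (if max 1 (current - window) = 1 then [] else [1])
      ++ PySem.List.pyRange (max 1 (current - window)) (min total (current + window) + 1) 1
      ++ (if min total (current + window) = total then [] else [total]) := by
  set lo := max 1 (current - window) with hlo
  set hi := min total (current + window) with hhi
  have h1 : 1 ≤ lo := le_max_left _ _
  have h2 : hi ≤ total := min_le_left _ _
  have hmem : ∀ y : Int, y ∈ PySem.List.pyRange lo (hi + 1) 1 ↔ lo ≤ y ∧ y < hi + 1 :=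
    fun y => PySem.List.mem_pyRange_one
  have hHd : ∀ y : Int, (y ∈ (if lo = 1 then ([] : List Int) else [1])) ↔ (¬ lo = 1 ∧ y = 1) := by
    intro y; split <;> simp_all
  have hTl : ∀ y : Int, (y ∈ (if hi = total then ([] : List Int) else [total])) ↔ (¬ hi = total ∧ y = total) := by
    intro y; split <;> simp_all
  have hpw : ((if lo = 1 then ([] : List Int) else [1]) ++ PySem.List.pyRange lo (hi + 1) 1
      ++ (if hi = total then ([] : List Int) else [total])).Pairwise (fun a b => a < b) := by
    rw [List.pairwise_append, List.pairwise_append]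
    refine ⟨⟨?_, PySem.List.pairwise_lt_pyRange_one lo (hi + 1), ?_⟩, ?_, ?_⟩
    · split <;> simp
    · intro x hx y hy; rw [hHd] at hx; rw [hmem] at hy; omega
    · split <;> simp
    · intro x hx y hy
      rw [List.mem_append] at hx; rw [hTl] at hy
      rcases hx with hx | hx
      · rw [hHd] at hx; omega
      · rw [hmem] at hx; omega
  apply PySem.List.sorted_eq_of_perm_of_pairwise_lt
  · -- permutation: both sides have the same members and no duplicates
    have hfold : (PySem.List.pyRange lo (hi + 1) 1).foldl PySem.Set.add
        ((PySem.Set.empty.add 1).add total)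
        = PySem.Set.update ((PySem.Set.empty.add 1).add total) (PySem.List.pyRange lo (hi + 1) 1) := rfl
    rw [hfold]
    apply (List.perm_ext_iff_of_nodup ?_ ?_).mpr
    · intro y
      rw [PySem.Set.mem_update]
      simp only [List.mem_append, hHd, hTl, hmem, PySem.Set.mem_add, PySem.Set.empty,
        List.not_mem_nil, false_or]
      omega
    · exact hpw.imp ne_of_lt
    · apply PySem.Set.nodup_update
      apply PySem.Set.nodup_add
      apply PySem.Set.nodup_add
      simp [PySem.Set.empty]
  · exact hpw

-- the page set A builds, as a sorted list, when the window run is empty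
theorem A_sorted_empty (current total window : Int)
    (h : min total (current + window) < max 1 (current - window)) :
    PySem.List.sorted
      ((PySem.List.pyRange (max 1 (current - window)) (min total (current + window) + 1) 1).foldl
        PySem.Set.add ((PySem.Set.empty.add 1).add total)) (fun x => x) false
    = if total < 1 then [total, 1] else if total = 1 then [1] else [1, total] := by
  rw [PySem.List.pyRange_one_eq_nil (by omega)]
  simp only [List.foldl_nil]
  apply PySem.List.sorted_eq_of_perm_of_pairwise_lt
  · apply (List.perm_ext_iff_of_nodup ?_ ?_).mpr
    · intro y
      simp only [PySem.Set.mem_add, PySem.Set.empty, List.not_mem_nil, false_or]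
      split_ifs <;> simp <;> omega
    · split_ifs <;> simp <;> omega
    · apply PySem.Set.nodup_add
      apply PySem.Set.nodup_add
      simp [PySem.Set.empty]
  · split_ifs <;> simp <;> omega

-- one step of B's merge loop, on the three list shapes it meets
theorem mergeStep_nil (x y : Int) : mergeStep [] (x, y) = [(x, y)] := by simp [mergeStep]
theorem mergeStep_one (x y u v : Int) :
    mergeStep [(x, y)] (u, v) = if u ≤ y + 1 then [(x, max y v)] else [(x, y), (u, v)] := by
  simp [mergeStep]
theorem mergeStep_two (x y u v a b : Int) : mergeStep [(x, y), (u, v)] (a, b)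
    = if a ≤ v + 1 then [(x, y), (u, max v b)] else [(x, y), (u, v), (a, b)] := by
  simp [mergeStep]

-- one step of B's emit loop
theorem emitRun_nil (a b : Int) : emitRun [] (a, b) = PySem.List.pyRange a (b + 1) 1 := by
  simp [emitRun]
theorem emitRun_cons (a b : Int) (l : List Int) (x : Int) :
    emitRun (x :: l) (a, b) = (x :: l) ++ [-1] ++ PySem.List.pyRange a (b + 1) 1 := by
  simp [emitRun]

-- B's sort of the three runs, when the window run is nonempty
theorem sorted2_main (lo hi total : Int) (h1 : 1 ≤ lo) (h : lo ≤ hi) (h2 : hi ≤ total) :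
    PySem.List.sorted2 ([((1:Int), (1:Int)), (total, total)] ++ [(lo, hi)]) Prod.fst Prod.snd false
      = [((1:Int), (1:Int)), (lo, hi), (total, total)] := by
  simp only [PySem.List.sorted2, List.foldl_cons, List.foldl_nil, List.cons_append, List.nil_append]
  simp only [PySem.List.insertBy]
  split_ifs <;> (simp only [PySem.List.insertBy]; split_ifs) <;> simp_all [Prod.ext_iff] <;> omega

-- B's merge + emit over the three sorted runs, when the window run is nonempty
theorem B_main (lo hi total : Int) (h1 : 1 ≤ lo) (h : lo ≤ hi) (h2 : hi ≤ total) :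
    ([((1:Int), (1:Int)), (lo, hi), (total, total)].foldl mergeStep []).foldl emitRun []
      = (if 2 < lo then [(1:Int), -1] else [])
        ++ PySem.List.pyRange (if 2 < lo then lo else 1) ((if total ≤ hi + 1 then total else hi) + 1) 1
        ++ (if total ≤ hi + 1 then [] else [-1, total]) := by
  simp only [List.foldl_cons, List.foldl_nil, mergeStep_nil, mergeStep_one]
  by_cases hlo : lo ≤ 1 + 1
  · rw [if_pos hlo, show max 1 hi = hi by omega, mergeStep_one,
      if_neg (show ¬ 2 < lo by omega)]
    by_cases ht : total ≤ hi + 1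
    · rw [if_pos ht, if_pos ht, show max hi total = total by omega]
      simp only [List.foldl_cons, List.foldl_nil, emitRun_nil]
      simp [show ¬ 2 < lo by omega, ht]
    · rw [if_neg ht, if_neg ht]
      simp only [List.foldl_cons, List.foldl_nil, emitRun_nil]
      rw [PySem.List.pyRange_one_cons (show (1:Int) < hi + 1 by omega), emitRun_cons,
        PySem.List.pyRange_one_singleton]
      simp only [if_neg (show ¬ 2 < lo by omega), if_neg ht]
      rw [PySem.List.pyRange_one_cons (show (1:Int) < hi + 1 by omega)]
      norm_num
  · rw [if_neg hlo, mergeStep_two, if_pos (show 2 < lo by omega)]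
    by_cases ht : total ≤ hi + 1
    · rw [if_pos ht, if_pos ht, show max hi total = total by omega]
      simp only [List.foldl_cons, List.foldl_nil, emitRun_nil]
      rw [PySem.List.pyRange_one_singleton, emitRun_cons]
      simp [show 2 < lo by omega, ht]
    · rw [if_neg ht, if_neg ht]
      simp only [List.foldl_cons, List.foldl_nil, emitRun_nil]
      rw [PySem.List.pyRange_one_singleton, emitRun_cons]
      simp only [List.cons_append, List.nil_append]
      rw [emitRun_cons, PySem.List.pyRange_one_singleton]
      simp [show 2 < lo by omega, ht]

-- A's gap fold over its sorted page list equals B's closed form, when the window run is nonempty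
theorem A_main_val (lo hi total : Int) (h1 : 1 ≤ lo) (h : lo ≤ hi) (h2 : hi ≤ total) :
    (((if lo = 1 then ([] : List Int) else [1]) ++ PySem.List.pyRange lo (hi + 1) 1
        ++ (if hi = total then ([] : List Int) else [total])).foldl aStep ([], none)).1
    = (if 2 < lo then [(1:Int), -1] else [])
      ++ PySem.List.pyRange (if 2 < lo then lo else 1) ((if total ≤ hi + 1 then total else hi) + 1) 1
      ++ (if total ≤ hi + 1 then [] else [-1, total]) := by
  rw [List.foldl_append, List.foldl_append]
  have hmid : (PySem.List.pyRange lo (hi + 1) 1).foldl aStep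
        ((if lo = 1 then ([] : List Int) else [1]).foldl aStep ([], none))
      = ((if 2 < lo then [(1:Int), -1] else [])
          ++ PySem.List.pyRange (if 2 < lo then lo else 1) (hi + 1) 1, some hi) := by
    by_cases hl : lo = 1
    · rw [if_pos hl, if_neg (show ¬ 2 < lo by omega)]
      simp only [List.foldl_nil]
      rw [hl, gapfold_none 1 hi [] (by omega)]
      simp
    · rw [if_neg hl]
      simp only [List.foldl_cons, List.foldl_nil]
      rw [show aStep ([], none) 1 = ([1], some 1) by simp [aStep]]
      rw [gapfold_chunk lo hi 1 [1] (by omega)]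
      by_cases hl2 : 2 < lo
      · rw [if_pos (show lo - 1 > 1 by omega), if_pos hl2, if_pos hl2]
        simp
      · rw [if_neg (show ¬ lo - 1 > 1 by omega), if_neg hl2, if_neg hl2]
        rw [show lo = 2 by omega, PySem.List.pyRange_one_cons (show (1:Int) < hi + 1 by omega)]
        norm_num
  rw [hmid]
  by_cases hht : hi = total
  · rw [if_pos hht, if_pos (show total ≤ hi + 1 by omega), if_pos (show total ≤ hi + 1 by omega)]
    simp only [List.foldl_nil]
    rw [hht]
    simp
  · rw [if_neg hht]
    simp only [List.foldl_cons, List.foldl_nil, aStep]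
    by_cases hgap : total - hi > 1
    · rw [if_pos hgap, if_neg (show ¬ total ≤ hi + 1 by omega), if_neg (show ¬ total ≤ hi + 1 by omega)]
      simp
    · rw [if_neg hgap, if_pos (show total ≤ hi + 1 by omega), if_pos (show total ≤ hi + 1 by omega)]
      rw [show total = hi + 1 by omega,
        PySem.List.pyRange_one_succ_right (show (if 2 < lo then lo else 1) ≤ hi + 1 by split_ifs <;> omega)]
      simp

-- the two programs agree when the window run is empty (only the endpoints survive)
theorem AB_empty (total : Int) :
    ((if total < 1 then [total, 1] else if total = 1 then [(1:Int)] else [1, total]).foldl aStep ([], none)).1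
    = ((PySem.List.sorted2 [((1:Int), (1:Int)), (total, total)] Prod.fst Prod.snd false).foldl mergeStep []).foldl emitRun [] := by
  have hs : PySem.List.sorted2 [((1:Int), (1:Int)), (total, total)] Prod.fst Prod.snd false
      = if total < 1 then [(total, total), ((1:Int), (1:Int))] else [((1:Int), (1:Int)), (total, total)] := by
    simp only [PySem.List.sorted2, List.foldl_cons, List.foldl_nil]
    simp only [PySem.List.insertBy]
    split_ifs <;> simp_all
  rw [hs]
  by_cases ht0 : total < 1
  · rw [if_pos ht0, if_pos ht0]
    simp only [List.foldl_cons, List.foldl_nil, mergeStep_nil, mergeStep_one]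
    by_cases htm : (1:Int) ≤ total + 1
    · rw [if_pos htm, show max total 1 = 1 by omega, show total = 0 by omega]
      simp [aStep]
      decide
    · rw [if_neg htm]
      simp only [List.foldl_cons, List.foldl_nil, emitRun_nil, PySem.List.pyRange_one_singleton,
        emitRun_cons]
      simp [aStep, show (1:Int) - total > 1 by omega]
  · rw [if_neg ht0, if_neg ht0]
    simp only [List.foldl_cons, List.foldl_nil, mergeStep_nil, mergeStep_one]
    by_cases ht1 : total = 1
    · rw [if_pos ht1, if_pos (by omega : total ≤ (1:Int) + 1), show max 1 total = 1 by omega]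
      simp [aStep]
      decide
    · rw [if_neg ht1]
      by_cases ht2 : total ≤ (1:Int) + 1
      · rw [if_pos ht2, show max 1 total = total by omega, show total = 2 by omega]
        simp [aStep]
        decide
      · rw [if_neg ht2]
        simp only [List.foldl_cons, List.foldl_nil, emitRun_nil, PySem.List.pyRange_one_singleton,
          emitRun_cons]
        simp [aStep, show total - 1 > 1 by omega]

-- ===== VERDICT (by name: the statement is the Claim_ definition above) =====
theorem make_page_range_spec : Claim_equal_make_page_range := by
  intro current total window _
  show make_page_range current total window = make_page_range_alt current total window
  simp only [make_page_range, make_page_range_alt]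
  by_cases h : max 1 (current - window) ≤ min total (current + window)
  · rw [if_pos h, A_sorted_main current total window h,
      A_main_val _ _ _ (le_max_left _ _) h (min_le_left _ _),
      sorted2_main _ _ _ (le_max_left _ _) h (min_le_left _ _),
      B_main _ _ _ (le_max_left _ _) h (min_le_left _ _)]
  · rw [if_neg h, A_sorted_empty current total window (lt_of_not_ge h)]
    exact AB_empty total
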